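-- pv_equiv track=rewrite | github.com/hua0-richard/rag-obs | backend/utils/obsidian.py | find_inline_math_in_line
-- ===== SOURCE A (Python) =====
-- _INLINE_MATH_MAX_LEN = 200
--
-- def find_inline_math_in_line(line: str) -> list[str]:
--     results: list[str] = []
--     if "$" not in line:
--         return results
--     in_inline = False
--     start = 0
--     i = 0
--     while i < len(line):
--         ch = line[i]
--         if ch == "\\":
--             i += 2
--             continue
--         if ch == "$":
--             if i + 1 < len(line) and line[i + 1] == "$":
--                 i += 2
--                 continue
--             if not in_inline:
--                 in_inline = True
--                 start = i
--                 i += 1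
--                 continue
--             expr = line[start + 1 : i]
--             if expr.strip():
--                 math = f"${expr}$"
--                 if len(math) <= _INLINE_MATH_MAX_LEN:
--                     results.append(math)
--             in_inline = False
--             i += 1
--             continue
--         i += 1
--     return results
-- ===== SOURCE B (Python) =====
-- _INLINE_MATH_MAX_LEN = 200
--
-- def find_inline_math_in_line(line: str) -> list[str]:
--     if "$" not in line:
--         return []
--     # pass 1: indices of lone '$' delimiters (same skip rules: '\' eats the
--     # next char, '$$' is skipped whole)
--     delims: list[int] = []
--     n = len(line)
--     i = 0
--     while i < n:
--         c = line[i]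
--         if c == "\\":
--             i += 2
--         elif c == "$":
--             if i + 1 < n and line[i + 1] == "$":
--                 i += 2
--             else:
--                 delims.append(i)
--                 i += 1
--         else:
--             i += 1
--     # pass 2: pair up consecutive delimiters and emit the spans
--     out: list[str] = []
--     rest = delims
--     while len(rest) >= 2:
--         opn, close = rest[0], rest[1]
--         expr = line[opn + 1 : close]
--         if expr.strip() and len(expr) <= _INLINE_MATH_MAX_LEN - 2:
--             out.append("$" + expr + "$")
--         rest = rest[2:]
--     return out
-- ===== Notes on version B (the rewrite author's own statement) =====
-- stated objective: alternative
-- what changed: A interleaves delimiter detection, pairing state and emission in one stateful while-loop; B separates it into two passes: a scan that only collects the indices of lone '$' delimiters, then a pairing pass over consecutive index pairs that slices and emits the spans.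
import Mathlib
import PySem

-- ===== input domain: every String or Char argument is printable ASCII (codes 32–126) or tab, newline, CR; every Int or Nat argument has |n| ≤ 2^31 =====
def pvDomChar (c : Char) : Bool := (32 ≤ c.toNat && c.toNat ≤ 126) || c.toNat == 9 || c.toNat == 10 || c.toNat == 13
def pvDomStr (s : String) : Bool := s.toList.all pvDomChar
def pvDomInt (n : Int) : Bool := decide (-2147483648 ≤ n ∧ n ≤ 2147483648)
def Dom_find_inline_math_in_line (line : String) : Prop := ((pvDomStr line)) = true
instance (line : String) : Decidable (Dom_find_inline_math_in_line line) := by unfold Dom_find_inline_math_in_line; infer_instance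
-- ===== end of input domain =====

-- B replaces A's single stateful scan (pairing state + emission interleaved) by two
-- passes: collect the indices of lone '$' delimiters, then pair consecutive indices
-- and emit the spans; same result, alternative decomposition.

-- ===== PORT A =====
-- A's while-loop: state (i, in_inline, start, results); i advances 1 or 2 per step.
def pvALoop (cs : List Char) (i : Nat) (inInline : Bool) (start : Nat)
    (results : List String) : List String :=
  if h : i < cs.length then
    let ch := cs[i]
    if ch = '\\' then
      pvALoop cs (i + 2) inInline start results
    else if ch = '$' then
      if cs[i + 1]? = some '$' then  -- encodes: i+1 < len(line) and line[i+1] == '$'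
        pvALoop cs (i + 2) inInline start results
      else if inInline = false then
        pvALoop cs (i + 1) true i results
      else
        let expr := PySem.List.slice cs (some ((start : Int) + 1)) (some (i : Int))
        let results' :=
          if PySem.Chars.strip expr ≠ [] then
            if ('$' :: expr ++ ['$']).length ≤ 200 then
              results ++ [String.ofList ('$' :: expr ++ ['$'])]
            else results
          else results
        pvALoop cs (i + 1) false start results'
    else
      pvALoop cs (i + 1) inInline start results
  else results
termination_by cs.length - i
decreasing_by all_goals omega

def find_inline_math_in_line (line : String) : List String :=
  if '$' ∈ line.toList then pvALoop line.toList 0 false 0 [] else []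

-- ===== PORT B =====
-- pass 1: indices of lone '$' delimiters (same skip rules, no pairing state)
def pvBScan (cs : List Char) (i : Nat) (delims : List Nat) : List Nat :=
  if h : i < cs.length then
    let c := cs[i]
    if c = '\\' then
      pvBScan cs (i + 2) delims
    else if c = '$' then
      if cs[i + 1]? = some '$' then  -- encodes: i+1 < n and line[i+1] == '$'
        pvBScan cs (i + 2) delims
      else
        pvBScan cs (i + 1) (delims ++ [i])
    else
      pvBScan cs (i + 1) delims
  else delims
termination_by cs.length - i
decreasing_by all_goals omega

-- pass 2: pair up consecutive delimiters and emit the spans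
def pvBPair (cs : List Char) : List Nat → List String → List String
  | opn :: close :: rest, out =>
      let expr := PySem.List.slice cs (some ((opn : Int) + 1)) (some (close : Int))
      let out' :=
        if PySem.Chars.strip expr ≠ [] ∧ expr.length ≤ 200 - 2 then
          out ++ [String.ofList ('$' :: expr ++ ['$'])]
        else out
      pvBPair cs rest out'
  | _, out => out

def find_inline_math_in_line_alt (line : String) : List String :=
  if '$' ∈ line.toList then pvBPair line.toList (pvBScan line.toList 0 []) [] else []

-- ===== PRECONDITION & SPEC =====
def Spec_find_inline_math_in_line (line : String) (out : List String) : Prop := out = find_inline_math_in_line_alt line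
instance (line : String) (out : List String) : Decidable (Spec_find_inline_math_in_line line out) := by unfold Spec_find_inline_math_in_line; infer_instance

-- ===== CLAIM (what is proved, stated in full; the proofs are below) =====
def Claim_equal_find_inline_math_in_line : Prop := ∀ (line : String), Dom_find_inline_math_in_line line → Spec_find_inline_math_in_line line (find_inline_math_in_line line)

-- ===== LEMMAS AND PROOFS =====

lemma pvBScan_stop (cs : List Char) (i : Nat) (ds : List Nat) (hi : ¬ i < cs.length) :
    pvBScan cs i ds = ds := by
  rw [pvBScan.eq_def, dif_neg hi]

lemma pvALoop_stop (cs : List Char) (i : Nat) (b : Bool) (start : Nat) (res : List String)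
    (hi : ¬ i < cs.length) : pvALoop cs i b start res = res := by
  rw [pvALoop.eq_def, dif_neg hi]

lemma pvBScan_acc (cs : List Char) :
    ∀ k i ds, cs.length - i ≤ k → pvBScan cs i ds = ds ++ pvBScan cs i [] := by
  intro k
  induction k with
  | zero =>
      intro i ds h
      rw [pvBScan_stop cs i ds (by omega), pvBScan_stop cs i [] (by omega)]
      simp
  | succ k ih =>
      intro i ds h
      by_cases hi : i < cs.length
      · rw [pvBScan.eq_def, dif_pos hi]
        conv_rhs => rw [pvBScan.eq_def, dif_pos hi]
        dsimp only
        by_cases h1 : cs[i] = '\\'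
        · simp only [if_pos h1]
          exact ih _ _ (by omega)
        · simp only [if_neg h1]
          by_cases h2 : cs[i] = '$'
          · simp only [if_pos h2]
            by_cases h3 : cs[i + 1]? = some '$'
            · simp only [if_pos h3]
              exact ih _ _ (by omega)
            · simp only [if_neg h3]
              rw [ih (i + 1) (ds ++ [i]) (by omega), ih (i + 1) ([] ++ [i]) (by omega)]
              simp
          · simp only [if_neg h2]
            exact ih _ _ (by omega)
      · rw [pvBScan_stop cs i ds hi, pvBScan_stop cs i [] hi]; simp

lemma pvBPair_acc (cs : List Char) :
    ∀ k l out, l.length ≤ k → pvBPair cs l out = out ++ pvBPair cs l [] := by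
  intro k
  induction k with
  | zero =>
      intro l out h
      match l with
      | [] => simp [pvBPair]
  | succ k ih =>
      intro l out h
      match l with
      | [] => simp [pvBPair]
      | [o] => simp [pvBPair]
      | o :: c :: rest =>
          rw [pvBPair, pvBPair]
          have hr : rest.length ≤ k := by simp at h; omega
          by_cases hc : PySem.Chars.strip (PySem.List.slice cs (some ((o : Int) + 1)) (some (c : Int))) ≠ [] ∧
              (PySem.List.slice cs (some ((o : Int) + 1)) (some (c : Int))).length ≤ 200 - 2
          · rw [if_pos hc, if_pos hc,
              ih rest (out ++ [String.ofList ('$' :: PySem.List.slice cs (some ((o : Int) + 1)) (some (c : Int)) ++ ['$'])]) hr,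
              ih rest ([] ++ [String.ofList ('$' :: PySem.List.slice cs (some ((o : Int) + 1)) (some (c : Int)) ++ ['$'])]) hr]
            simp
          · rw [if_neg hc, if_neg hc]
            exact ih rest out hr

-- the emitted element and its guard agree between the two ports
lemma pv_emit_eq (expr : List Char) (res : List String) :
    (if PySem.Chars.strip expr ≠ [] then
       if ('$' :: expr ++ ['$']).length ≤ 200 then res ++ [String.ofList ('$' :: expr ++ ['$'])]
       else res
     else res) =
    res ++ (if PySem.Chars.strip expr ≠ [] ∧ expr.length ≤ 200 - 2 then
        [String.ofList ('$' :: expr ++ ['$'])]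
      else []) := by
  have hlen : ('$' :: expr ++ ['$']).length = expr.length + 2 := by simp
  by_cases h1 : PySem.Chars.strip expr ≠ []
  · by_cases h2 : expr.length ≤ 198
    · rw [if_pos h1, if_pos (by omega), if_pos ⟨h1, by omega⟩]
    · rw [if_pos h1, if_neg (by omega), if_neg (by simp [h1]; omega)]
      simp
  · rw [if_neg h1, if_neg (by tauto)]; simp

lemma pv_main (cs : List Char) :
    ∀ k i, cs.length - i ≤ k → ∀ start res,
      pvALoop cs i false start res = res ++ pvBPair cs (pvBScan cs i []) [] ∧
      pvALoop cs i true start res = res ++ pvBPair cs (start :: pvBScan cs i []) [] := by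
  intro k
  induction k with
  | zero =>
      intro i h start res
      rw [pvALoop_stop cs i false start res (by omega),
        pvALoop_stop cs i true start res (by omega), pvBScan_stop cs i [] (by omega)]
      constructor <;> simp [pvBPair]
  | succ k ih =>
      intro i h start res
      by_cases hi : i < cs.length
      · have hscan : pvBScan cs i [] =
            if cs[i] = '\\' then pvBScan cs (i + 2) []
            else if cs[i] = '$' then
              if cs[i + 1]? = some '$' then pvBScan cs (i + 2) []
              else pvBScan cs (i + 1) ([] ++ [i])
            else pvBScan cs (i + 1) [] := by
          conv_lhs => rw [pvBScan.eq_def]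
          rw [dif_pos hi]
        refine ⟨?_, ?_⟩
        · conv_lhs => rw [pvALoop.eq_def]
          rw [dif_pos hi, hscan]
          dsimp only
          by_cases h1 : cs[i] = '\\'
          · simp only [if_pos h1]
            exact (ih _ (by omega) start res).1
          · simp only [if_neg h1]
            by_cases h2 : cs[i] = '$'
            · simp only [if_pos h2]
              by_cases h3 : cs[i + 1]? = some '$'
              · simp only [if_pos h3]
                exact (ih _ (by omega) start res).1
              · simp only [if_neg h3, List.nil_append]
                rw [pvBScan_acc cs (cs.length - (i + 1)) (i + 1) [i] (by omega)]
                simp only [List.singleton_append]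
                exact (ih (i + 1) (by omega) i res).2
            · simp only [if_neg h2]
              exact (ih _ (by omega) start res).1
        · conv_lhs => rw [pvALoop.eq_def]
          rw [dif_pos hi, hscan]
          dsimp only
          by_cases h1 : cs[i] = '\\'
          · simp only [if_pos h1]
            exact (ih _ (by omega) start res).2
          · simp only [if_neg h1]
            by_cases h2 : cs[i] = '$'
            · simp only [if_pos h2]
              by_cases h3 : cs[i + 1]? = some '$'
              · simp only [if_pos h3]
                exact (ih _ (by omega) start res).2
              · simp only [if_neg h3, List.nil_append,
                  if_neg (by decide : ¬ (true = false))]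
                rw [pvBScan_acc cs (cs.length - (i + 1)) (i + 1) [i] (by omega)]
                simp only [List.singleton_append]
                rw [(ih (i + 1) (by omega) start _).1]
                rw [pv_emit_eq]
                conv_rhs => rw [pvBPair]
                conv_rhs => rw [pvBPair_acc cs (pvBScan cs (i + 1) []).length _ _ (le_refl _)]
                simp
            · simp only [if_neg h2]
              exact (ih _ (by omega) start res).2
      · rw [pvALoop_stop cs i false start res hi, pvALoop_stop cs i true start res hi,
          pvBScan_stop cs i [] hi]
        constructor <;> simp [pvBPair]

-- ===== VERDICT (by name: the statement is the Claim_ definition above) =====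
theorem find_inline_math_in_line_spec : Claim_equal_find_inline_math_in_line := by
  intro line _
  unfold Spec_find_inline_math_in_line find_inline_math_in_line find_inline_math_in_line_alt
  by_cases h : '$' ∈ line.toList
  · rw [if_pos h, if_pos h]
    have := (pv_main line.toList (line.toList.length - 0) 0 (by omega) 0 []).1
    rw [this]; simp
  · rw [if_neg h, if_neg h]
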